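-- pv_equiv track=rewrite | github.com/CardinisCode/learning-python | finalproblems/finalproblem10encyption.py | process_rectangle_case_switch
-- ===== SOURCE A (Python) =====
-- def process_rectangle_case_switch(current_pair):
--     first_letter = current_pair[0]
--     first_letter_row = 0
--     first_letter_column = 0
--
--     second_letter = current_pair[1]
--     second_letter_row = 0
--     second_letter_column = 0
--
--     for index_row in range(0, len(CIPHER)):
--         current_row = CIPHER[index_row]
--         if first_letter in current_row:
--             first_letter_row = index_row
--             for index_column in range(0, len(current_row)):
--                 current_letter = current_row[index_column]
--
--                 if current_letter == first_letter:
--                     first_letter_column = index_column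
--
--     for index_row in range(0, len(CIPHER)):
--         current_row = CIPHER[index_row]
--         if second_letter in current_row:
--             second_letter_row = index_row
--             for index_column in range(0, len(current_row)):
--                 current_letter = current_row[index_column]
--
--                 if current_letter == second_letter:
--                     second_letter_column = index_column
--
--     first_cipher_letter = CIPHER[first_letter_row][second_letter_column]
--     second_cipher_letter = CIPHER[second_letter_row][first_letter_column]
--
--     return first_cipher_letter + second_cipher_letter
--
-- CIPHER = (("D", "A", "V", "I", "O"),
--           ("Y", "N", "E", "R", "B"),
--           ("C", "F", "G", "H", "K"),
--           ("L", "M", "P", "Q", "S"),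
--           ("T", "U", "W", "X", "Z"))
-- ===== SOURCE B (Python) =====
-- CIPHER = (("D", "A", "V", "I", "O"),
--           ("Y", "N", "E", "R", "B"),
--           ("C", "F", "G", "H", "K"),
--           ("L", "M", "P", "Q", "S"),
--           ("T", "U", "W", "X", "Z"))
--
-- # Position index built once: letter -> (row, column). Replaces A's per-call nested scans.
-- POS = {letter: (r, c) for r, row in enumerate(CIPHER) for c, letter in enumerate(row)}
--
--
-- def process_rectangle_case_switch(current_pair):
--     first_row, first_col = POS.get(current_pair[0], (0, 0))
--     second_row, second_col = POS.get(current_pair[1], (0, 0))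
--     return CIPHER[first_row][second_col] + CIPHER[second_row][first_col]
-- ===== Notes on version B (the rewrite author's own statement) =====
-- stated objective: simpler
-- what changed: A scans the whole 5x5 grid with nested loops twice per call; B precomputes a letter->(row,col) position dict once at module level and the function body becomes two table lookups (with the same (0,0) default for absent letters) plus the two grid reads.
import Mathlib
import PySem

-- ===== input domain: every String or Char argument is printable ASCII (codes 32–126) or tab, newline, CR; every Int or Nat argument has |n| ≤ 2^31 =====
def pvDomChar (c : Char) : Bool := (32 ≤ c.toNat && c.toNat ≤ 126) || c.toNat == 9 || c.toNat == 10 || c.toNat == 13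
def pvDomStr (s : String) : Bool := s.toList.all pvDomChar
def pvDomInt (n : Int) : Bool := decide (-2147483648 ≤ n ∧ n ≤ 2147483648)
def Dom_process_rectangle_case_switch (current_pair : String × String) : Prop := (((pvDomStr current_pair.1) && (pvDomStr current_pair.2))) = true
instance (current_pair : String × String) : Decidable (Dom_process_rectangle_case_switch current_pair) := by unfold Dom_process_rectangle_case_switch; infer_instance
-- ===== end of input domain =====

-- B replaces A's per-call nested scan loops by a position table built once (simpler constant-time lookup); return value proved equal on all inputs.

-- ===== PORT A =====
-- The module constant CIPHER (shared data for both ports).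
def pvCipher : List (List String) :=
  [["D", "A", "V", "I", "O"],
   ["Y", "N", "E", "R", "B"],
   ["C", "F", "G", "H", "K"],
   ["L", "M", "P", "Q", "S"],
   ["T", "U", "W", "X", "Z"]]

-- A's nested scan loop (the two loops in A are textually identical; transcribed once,
-- applied to each letter). State = (letter_row, letter_column), initially (0, 0).
def pvFindLoop (letter : String) : Int × Int :=
  (PySem.List.pyRange 0 (PySem.List.len pvCipher) 1).foldl
    (fun st index_row =>
      let current_row := PySem.List.pyGetD pvCipher index_row []   -- index from range(0, len): in range
      if letter ∈ current_row then
        let col := (PySem.List.pyRange 0 (PySem.List.len current_row) 1).foldl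
          (fun c index_column =>
            let current_letter := PySem.List.pyGetD current_row index_column ""
            if current_letter = letter then index_column else c) st.2
        (index_row, col)
      else st)
    (0, 0)

def process_rectangle_case_switch (current_pair : String × String) : String :=
  let f := pvFindLoop current_pair.1
  let s := pvFindLoop current_pair.2
  let first_cipher_letter := PySem.List.pyGetD (PySem.List.pyGetD pvCipher f.1 []) s.2 ""
  let second_cipher_letter := PySem.List.pyGetD (PySem.List.pyGetD pvCipher s.1 []) f.2 ""
  first_cipher_letter ++ second_cipher_letter

-- ===== PORT B =====
-- POS = {letter: (r, c) for r, row in enumerate(CIPHER) for c, letter in enumerate(row)}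
def pvPos : PySem.Dict String (Int × Int) :=
  (PySem.List.enumerate pvCipher 0).foldl
    (fun d rrow =>
      (PySem.List.enumerate rrow.2 0).foldl
        (fun d cletter => d.insert cletter.2 (rrow.1, cletter.1)) d)
    PySem.Dict.empty

def process_rectangle_case_switch_alt (current_pair : String × String) : String :=
  let p1 := pvPos.getD current_pair.1 (0, 0)
  let p2 := pvPos.getD current_pair.2 (0, 0)
  PySem.List.pyGetD (PySem.List.pyGetD pvCipher p1.1 []) p2.2 ""
    ++ PySem.List.pyGetD (PySem.List.pyGetD pvCipher p2.1 []) p1.2 ""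

-- ===== PRECONDITION & SPEC =====
def Spec_process_rectangle_case_switch (current_pair : String × String) (out : String) : Prop := out = process_rectangle_case_switch_alt current_pair
instance (current_pair : String × String) (out : String) : Decidable (Spec_process_rectangle_case_switch current_pair out) := by unfold Spec_process_rectangle_case_switch; infer_instance

-- ===== CLAIM (what is proved, stated in full; the proofs are below) =====
def Claim_equal_process_rectangle_case_switch : Prop := ∀ (current_pair : String × String), Dom_process_rectangle_case_switch current_pair → Spec_process_rectangle_case_switch current_pair (process_rectangle_case_switch current_pair)

-- ===== LEMMAS AND PROOFS =====

-- The 25 grid letters, flattened.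
def pvLetters : List String :=
  ["D", "A", "V", "I", "O", "Y", "N", "E", "R", "B", "C", "F", "G", "H", "K",
   "L", "M", "P", "Q", "S", "T", "U", "W", "X", "Z"]

-- A's scan loop and B's table lookup locate every string identically.
theorem pvFindLoop_eq_pos (s : String) : pvFindLoop s = pvPos.getD s (0, 0) := by
  by_cases h : s ∈ pvLetters
  · fin_cases h <;> rfl
  · simp only [pvLetters, List.mem_cons, List.not_mem_nil, or_false, not_or] at h
    obtain ⟨h1, h2, h3, h4, h5, h6, h7, h8, h9, h10, h11, h12, h13, h14, h15,
      h16, h17, h18, h19, h20, h21, h22, h23, h24, h25⟩ := h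
    simp [pvFindLoop, pvPos, pvCipher, PySem.List.pyRange, PySem.List.len,
      PySem.List.enumerate, PySem.Dict.getD, PySem.Dict.get?, PySem.Dict.insert,
      PySem.Dict.empty, PySem.List.pyGetD, PySem.List.pyGet?, PySem.List.pyIdx?,
      List.range_succ, List.find?, h1, h2, h3, h4, h5, h6, h7, h8, h9, h10, h11, h12, h13, h14, h15, h16, h17, h18, h19, h20, h21, h22, h23, h24, h25,
      beq_eq_false_iff_ne.mpr (Ne.symm h1),
      beq_eq_false_iff_ne.mpr (Ne.symm h2),
      beq_eq_false_iff_ne.mpr (Ne.symm h3),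
      beq_eq_false_iff_ne.mpr (Ne.symm h4),
      beq_eq_false_iff_ne.mpr (Ne.symm h5),
      beq_eq_false_iff_ne.mpr (Ne.symm h6),
      beq_eq_false_iff_ne.mpr (Ne.symm h7),
      beq_eq_false_iff_ne.mpr (Ne.symm h8),
      beq_eq_false_iff_ne.mpr (Ne.symm h9),
      beq_eq_false_iff_ne.mpr (Ne.symm h10),
      beq_eq_false_iff_ne.mpr (Ne.symm h11),
      beq_eq_false_iff_ne.mpr (Ne.symm h12),
      beq_eq_false_iff_ne.mpr (Ne.symm h13),
      beq_eq_false_iff_ne.mpr (Ne.symm h14),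
      beq_eq_false_iff_ne.mpr (Ne.symm h15),
      beq_eq_false_iff_ne.mpr (Ne.symm h16),
      beq_eq_false_iff_ne.mpr (Ne.symm h17),
      beq_eq_false_iff_ne.mpr (Ne.symm h18),
      beq_eq_false_iff_ne.mpr (Ne.symm h19),
      beq_eq_false_iff_ne.mpr (Ne.symm h20),
      beq_eq_false_iff_ne.mpr (Ne.symm h21),
      beq_eq_false_iff_ne.mpr (Ne.symm h22),
      beq_eq_false_iff_ne.mpr (Ne.symm h23),
      beq_eq_false_iff_ne.mpr (Ne.symm h24),
      beq_eq_false_iff_ne.mpr (Ne.symm h25)]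

-- ===== VERDICT (by name: the statement is the Claim_ definition above) =====
theorem process_rectangle_case_switch_spec : Claim_equal_process_rectangle_case_switch := by
  intro cp _
  show _ = _
  simp only [process_rectangle_case_switch, process_rectangle_case_switch_alt,
    pvFindLoop_eq_pos]
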